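-- pv_equiv track=rewrite | github.com/Yang-xinzhe/armv8-hidden-inst-detector | res/phase_1/decode_bitmap.py | bitmap_to_ranges
-- ===== SOURCE A (Python) =====
-- def bitmap_to_ranges(start, end, bitmap_bytes):
--     """
--     把一个区间 [start, end) 内的位图还原成若干连续的指令区间。
--     返回 [(range_start, range_end), ...]，同样是半开区间。
--     """
--     bits = end - start
--     ranges = []
--     cur_start = None
--
--     for offset in range(bits):
--         byte_index = offset // 8
--         bit_pos = offset % 8
--         bit_set = (bitmap_bytes[byte_index] >> bit_pos) & 1
--
--         if bit_set:
--             if cur_start is None: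
--                 cur_start = start + offset
--         else:
--             if cur_start is not None:
--                 ranges.append((cur_start, start + offset))
--                 cur_start = None
--
--     if cur_start is not None:
--         ranges.append((cur_start, end))
--
--     return ranges
-- ===== SOURCE B (Python) =====
-- from itertools import groupby
--
-- def bitmap_to_ranges(start, end, bitmap_bytes):
--     """
--     把一个区间 [start, end) 内的位图还原成若干连续的指令区间。
--     返回 [(range_start, range_end), ...]，同样是半开区间。
--     """
--     vals = [(bitmap_bytes[o // 8] >> (o % 8)) & 1 for o in range(end - start)]
--     ranges = []
--     i = 0
--     for v, g in groupby(vals):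
--         n = len(list(g))
--         if v:
--             ranges.append((start + i, start + i + n))
--         i += n
--     return ranges
-- ===== Notes on version B (the rewrite author's own statement) =====
-- stated objective: alternative
-- what changed: Replaces A's stateful run-tracking scan (cur_start carried across the loop, trailing close after it) with a materialize-then-group decomposition: build the bit-value list with a comprehension, then itertools.groupby emits one (start+i, start+i+len) range per run of ones.
-- outside the precondition, e.g. on bitmap_to_ranges(0, 9, [5]): A raises IndexError, B raises IndexError
import Mathlib
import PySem

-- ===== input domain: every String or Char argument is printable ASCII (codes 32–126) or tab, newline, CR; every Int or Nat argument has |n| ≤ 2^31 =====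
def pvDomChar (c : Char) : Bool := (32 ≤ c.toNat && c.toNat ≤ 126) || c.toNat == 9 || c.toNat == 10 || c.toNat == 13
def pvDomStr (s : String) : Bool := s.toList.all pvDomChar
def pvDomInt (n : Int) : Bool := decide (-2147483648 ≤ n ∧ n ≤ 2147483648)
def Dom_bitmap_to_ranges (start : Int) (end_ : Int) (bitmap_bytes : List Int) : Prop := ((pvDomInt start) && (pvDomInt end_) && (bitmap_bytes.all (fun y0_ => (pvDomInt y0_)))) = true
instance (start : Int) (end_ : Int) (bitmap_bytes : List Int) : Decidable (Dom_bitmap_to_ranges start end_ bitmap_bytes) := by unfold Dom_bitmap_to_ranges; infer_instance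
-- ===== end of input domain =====

-- B replaces A's stateful run-tracking scan with materialize-the-bit-list then group-consecutive-runs (itertools.groupby); objective: alternative decomposition, same O(bits) cost.

-- ===== PORT A =====
def bitmap_to_ranges (start : Int) (end_ : Int) (bitmap_bytes : List Int) : List (Int × Int) :=
  let bits := end_ - start
  let st := (PySem.List.pyRange 0 bits 1).foldl
    (fun (s : List (Int × Int) × Option Int) offset =>
      let byte_index := PySem.Int.floordiv offset 8
      let bit_pos := PySem.Int.mod offset 8
      -- bitmap_bytes[byte_index]: in range under Pre_; the .getD 0 default never fires there.
      -- bit_pos = offset % 8 ∈ [0,8), so .toNat on the shift amount is exact.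
      let bit_set := PySem.Int.band ((PySem.List.pyGet? bitmap_bytes byte_index).getD 0 >>> bit_pos.toNat) 1
      if bit_set ≠ 0 then
        match s.2 with
        | none => (s.1, some (start + offset))
        | some _ => s
      else
        match s.2 with
        | some c => (s.1 ++ [(c, start + offset)], none)
        | none => s)
    ([], none)
  match st.2 with
  | some c => st.1 ++ [(c, end_)]
  | none => st.1

-- ===== PORT B =====
-- itertools.groupby over the materialized value list: list of (value, run length)
def pvGroupRuns : List Int → List (Int × Nat)
  | [] => []
  | x :: xs =>
    (x, (xs.takeWhile (· == x)).length + 1) :: pvGroupRuns (xs.dropWhile (· == x))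
termination_by l => l.length
decreasing_by simpa using Nat.lt_succ_of_le (List.length_dropWhile_le (· == x) xs)

def bitmap_to_ranges_alt (start : Int) (end_ : Int) (bitmap_bytes : List Int) : List (Int × Int) :=
  -- bit access as in Source B's comprehension; same exactness comments as in port A
  let vals := (PySem.List.pyRange 0 (end_ - start) 1).map (fun o =>
    PySem.Int.band ((PySem.List.pyGet? bitmap_bytes (PySem.Int.floordiv o 8)).getD 0 >>> (PySem.Int.mod o 8).toNat) 1)
  let res := (pvGroupRuns vals).foldl
    (fun (s : List (Int × Int) × Int) g =>
      if g.1 ≠ 0 then (s.1 ++ [(start + s.2, start + s.2 + (g.2 : Int))], s.2 + (g.2 : Int))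
      else (s.1, s.2 + (g.2 : Int)))
    ([], 0)
  res.1

-- ===== PRECONDITION & SPEC =====
-- Pre_ excludes exactly the inputs where Python A raises IndexError (bitmap shorter than the bit span); B raises there too.
def Pre_bitmap_to_ranges (start : Int) (end_ : Int) (bitmap_bytes : List Int) : Prop :=
  end_ - start ≤ 8 * bitmap_bytes.length
instance (start : Int) (end_ : Int) (bitmap_bytes : List Int) : Decidable (Pre_bitmap_to_ranges start end_ bitmap_bytes) := by unfold Pre_bitmap_to_ranges; infer_instance

def pvWitness_bitmap_to_ranges : Int × Int × List Int := (0, 8, [5])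

def Spec_bitmap_to_ranges (start : Int) (end_ : Int) (bitmap_bytes : List Int) (out : List (Int × Int)) : Prop := out = bitmap_to_ranges_alt start end_ bitmap_bytes
instance (start : Int) (end_ : Int) (bitmap_bytes : List Int) (out : List (Int × Int)) : Decidable (Spec_bitmap_to_ranges start end_ bitmap_bytes out) := by unfold Spec_bitmap_to_ranges; infer_instance

-- ===== CLAIM (what is proved, stated in full; the proofs are below) =====
def Claim_equal_bitmap_to_ranges : Prop := ∀ (start : Int) (end_ : Int) (bitmap_bytes : List Int), Dom_bitmap_to_ranges start end_ bitmap_bytes → Pre_bitmap_to_ranges start end_ bitmap_bytes → Spec_bitmap_to_ranges start end_ bitmap_bytes (bitmap_to_ranges start end_ bitmap_bytes)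

-- ===== LEMMAS AND PROOFS =====

-- A's trailing close of the loop state (same match shape as the port's final step)
def pvClose (st : List (Int × Int) × Option Int) (e : Int) : List (Int × Int) :=
  match st.2 with
  | some c => st.1 ++ [(c, e)]
  | none => st.1

-- Reference state machine: A's scan over the (already materialized) bit values
def pvMach : List Int → Int → Option Int → List (Int × Int)
  | [], p, cur => match cur with | some c => [(c, p)] | none => []
  | v :: rest, p, cur =>
    if v ≠ 0 then
      match cur with
      | none => pvMach rest (p + 1) (some p)
      | some c => pvMach rest (p + 1) (some c)
    else
      match cur with
      | some c => (c, p) :: pvMach rest (p + 1) none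
      | none => pvMach rest (p + 1) none

-- Reference for B's group fold, carried at absolute position p
def pvGF : List (Int × Nat) → Int → List (Int × Int)
  | [], _ => []
  | g :: gs, p => if g.1 ≠ 0 then (p, p + (g.2 : Int)) :: pvGF gs (p + (g.2 : Int)) else pvGF gs (p + (g.2 : Int))

theorem pvposs (y : Int) : PySem.Int.band y 1 = 0 ∨ PySem.Int.band y 1 = 1 := by
  rw [PySem.Int.band_one, PySem.Int.mod_eq_emod_of_pos (by norm_num : (0:Int) < 2)]
  omega

theorem pvMach_ones (t : List Int) : ∀ (r : List Int) (p c : Int), (∀ x ∈ t, x ≠ 0) →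
    pvMach (t ++ r) p (some c) = pvMach r (p + t.length) (some c) := by
  induction t with
  | nil => intro r p c _; simp
  | cons x t' ih =>
    intro r p c h
    have hx : x ≠ 0 := h x (by simp)
    simp only [List.cons_append, pvMach, if_pos hx]
    rw [ih r (p + 1) c (fun y hy => h y (by simp [hy]))]
    rw [show p + 1 + (t'.length : Int) = p + ((x :: t').length : Int) from by
      push_cast [List.length_cons]; ring]

theorem pvMach_zeros (t : List Int) : ∀ (r : List Int) (p : Int), (∀ x ∈ t, x = 0) →
    pvMach (t ++ r) p none = pvMach r (p + t.length) none := by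
  induction t with
  | nil => intro r p _; simp
  | cons x t' ih =>
    intro r p h
    have hx : x = 0 := h x (by simp)
    simp only [List.cons_append, pvMach, hx, if_neg (by simp : ¬ ((0:Int) ≠ 0))]
    rw [ih r (p + 1) (fun y hy => h y (by simp [hy]))]
    simp only [List.length_cons]
    rw [show p + 1 + (t'.length : Int) = p + ((t'.length + 1 : Nat) : Int) from by push_cast; ring]

theorem pvMach_close (r : List Int) (p c : Int) (h : ∀ x, r.head? = some x → x = 0) :
    pvMach r p (some c) = (c, p) :: pvMach r p none := by
  cases r with
  | nil => rfl
  | cons x r' =>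
    have hx : x = 0 := h x rfl
    simp [pvMach, hx]

theorem pvMach_cons_zero (l : List Int) (q : Int) : pvMach (0 :: l) q none = pvMach l (q + 1) none := by
  simp [pvMach]

theorem pvMach_cons_one (l : List Int) (q : Int) : pvMach (1 :: l) q none = pvMach l (q + 1) (some q) := by
  simp [pvMach]

theorem pvMain : ∀ (l : List Int), (∀ x ∈ l, x = 0 ∨ x = 1) → ∀ (p : Int),
    pvMach l p none = pvGF (pvGroupRuns l) p := by
  intro l
  induction l using pvGroupRuns.induct with
  | case1 => intro _ p; simp [pvMach, pvGroupRuns, pvGF]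
  | case2 x xs ih =>
    intro h01 p
    set t := xs.takeWhile (· == x) with ht
    set r := xs.dropWhile (· == x) with hr
    have htr : t ++ r = xs := List.takeWhile_append_dropWhile
    have ht_all : ∀ y ∈ t, y = x := by
      intro y hy
      simpa using List.mem_takeWhile_imp hy
    have hr01 : ∀ y ∈ r, y = 0 ∨ y = 1 := by
      intro y hy
      exact h01 y (List.mem_cons_of_mem x (htr ▸ List.mem_append_right t hy))
    have hrhead : ∀ y, r.head? = some y → y ≠ x := by
      intro y hy
      have hh := List.head?_dropWhile_not (· == x) xs
      rw [← hr, hy] at hh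
      simpa using hh
    have hgr : pvGroupRuns (x :: xs) = (x, t.length + 1) :: pvGroupRuns r := by
      rw [pvGroupRuns]
    rcases h01 x (by simp) with hx | hx
    · -- x = 0 : a zero run, no range emitted
      subst hx
      rw [hgr, show pvGF ((0, t.length + 1) :: pvGroupRuns r) p
            = pvGF (pvGroupRuns r) (p + ((t.length + 1 : Nat) : Int)) from by simp [pvGF]]
      calc pvMach (0 :: xs) p none
          = pvMach (0 :: (t ++ r)) p none := by rw [htr]
        _ = pvMach (t ++ r) (p + 1) none := pvMach_cons_zero _ _
        _ = pvMach r (p + 1 + t.length) none :=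
            pvMach_zeros t r (p + 1) (fun y hy => by have := ht_all y hy; omega)
        _ = pvGF (pvGroupRuns r) (p + 1 + t.length) := ih hr01 _
        _ = pvGF (pvGroupRuns r) (p + ((t.length + 1 : Nat) : Int)) := by
            rw [show p + 1 + (t.length : Int) = p + ((t.length + 1 : Nat) : Int) from by push_cast; ring]
    · -- x = 1 : a run of ones, one range emitted
      subst hx
      rw [hgr, show pvGF ((1, t.length + 1) :: pvGroupRuns r) p
            = (p, p + ((t.length + 1 : Nat) : Int)) :: pvGF (pvGroupRuns r) (p + ((t.length + 1 : Nat) : Int)) from by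
            simp [pvGF]]
      calc pvMach (1 :: xs) p none
          = pvMach (1 :: (t ++ r)) p none := by rw [htr]
        _ = pvMach (t ++ r) (p + 1) (some p) := pvMach_cons_one _ _
        _ = pvMach r (p + 1 + t.length) (some p) :=
            pvMach_ones t r (p + 1) p (fun y hy => by have := ht_all y hy; omega)
        _ = (p, p + 1 + t.length) :: pvMach r (p + 1 + t.length) none :=
            pvMach_close r _ p (by
              intro y hy
              rcases hr01 y (List.mem_of_mem_head? hy) with h0 | h1
              · exact h0
              · exact absurd h1 (hrhead y hy))
        _ = (p, p + ((t.length + 1 : Nat) : Int)) :: pvGF (pvGroupRuns r) (p + ((t.length + 1 : Nat) : Int)) := by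
            rw [ih hr01]
            rw [show p + 1 + (t.length : Int) = p + ((t.length + 1 : Nat) : Int) from by push_cast; ring]

-- A's foldl over offsets plus the trailing close equals pvMach over the mapped values
theorem pvFoldA (f : Int → Int) (start : Int) (n : Nat) : ∀ (a : Int) (acc : List (Int × Int)) (cur : Option Int),
    pvClose ((PySem.List.pyRange a (a + (n : Int)) 1).foldl
      (fun (s : List (Int × Int) × Option Int) offset =>
        if f offset ≠ 0 then
          match s.2 with
          | none => (s.1, some (start + offset))
          | some _ => s
        else
          match s.2 with
          | some c => (s.1 ++ [(c, start + offset)], none)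
          | none => s) (acc, cur)) (start + a + (n : Int))
    = acc ++ pvMach ((PySem.List.pyRange a (a + (n : Int)) 1).map f) (start + a) cur := by
  induction n with
  | zero =>
    intro a acc cur
    rw [PySem.List.pyRange_one_eq_nil (by omega : a + ((0 : Nat) : Int) ≤ a)]
    cases cur <;> simp [pvClose, pvMach]
  | succ m ih =>
    intro a acc cur
    rw [PySem.List.pyRange_one_cons (by push_cast; omega : a < a + ((m + 1 : Nat) : Int))]
    have e1 : a + ((m + 1 : Nat) : Int) = (a + 1) + (m : Int) := by push_cast; ring
    have e2 : start + a + ((m + 1 : Nat) : Int) = start + (a + 1) + (m : Int) := by push_cast; ring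
    rw [e1, e2]
    cases cur with
    | none =>
      by_cases hf : f a ≠ 0
      · simp only [List.foldl_cons, List.map_cons, pvMach, if_pos hf]
        rw [ih (a + 1) acc (some (start + a))]
        rw [show start + (a + 1) = start + a + 1 from by ring]
      · simp only [List.foldl_cons, List.map_cons, pvMach, if_neg hf]
        rw [ih (a + 1) acc none]
        rw [show start + (a + 1) = start + a + 1 from by ring]
    | some c =>
      by_cases hf : f a ≠ 0
      · simp only [List.foldl_cons, List.map_cons, pvMach, if_pos hf]
        rw [ih (a + 1) acc (some c)]
        rw [show start + (a + 1) = start + a + 1 from by ring]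
      · simp only [List.foldl_cons, List.map_cons, pvMach, if_neg hf]
        rw [ih (a + 1) (acc ++ [(c, start + a)]) none, List.append_assoc]
        rw [show start + (a + 1) = start + a + 1 from by ring]
        simp

-- B's foldl with relative offset state equals pvGF at absolute position
theorem pvFoldB (start : Int) : ∀ (gs : List (Int × Nat)) (acc : List (Int × Int)) (i : Int),
    ((gs.foldl
      (fun (s : List (Int × Int) × Int) g =>
        if g.1 ≠ 0 then (s.1 ++ [(start + s.2, start + s.2 + (g.2 : Int))], s.2 + (g.2 : Int))
        else (s.1, s.2 + (g.2 : Int))) (acc, i)).1)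
    = acc ++ pvGF gs (start + i) := by
  intro gs
  induction gs with
  | nil => intro acc i; simp [pvGF]
  | cons g gs' ih =>
    intro acc i
    simp only [List.foldl_cons, pvGF]
    by_cases hg : g.1 ≠ 0
    · simp only [if_pos hg]
      rw [ih (acc ++ [(start + i, start + i + (g.2 : Int))]) (i + g.2), List.append_assoc]
      rw [show start + (i + (g.2 : Int)) = start + i + (g.2 : Int) from by ring]
      simp
    · simp only [if_neg hg]
      rw [ih acc (i + g.2)]
      rw [show start + (i + (g.2 : Int)) = start + i + (g.2 : Int) from by ring]

-- ===== VERDICT (by name: the statement is the Claim_ definition above) =====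
theorem bitmap_to_ranges_spec : Claim_equal_bitmap_to_ranges := by
  intro start end_ bitmap_bytes _ _
  unfold Spec_bitmap_to_ranges bitmap_to_ranges bitmap_to_ranges_alt
  by_cases hpos : 0 < end_ - start
  · have hb : (((end_ - start).toNat : Nat) : Int) = end_ - start := by omega
    have hA := pvFoldA (fun o =>
      PySem.Int.band ((PySem.List.pyGet? bitmap_bytes (PySem.Int.floordiv o 8)).getD 0 >>> (PySem.Int.mod o 8).toNat) 1)
      start (end_ - start).toNat 0 [] none
    have hB := pvFoldB start (pvGroupRuns ((PySem.List.pyRange 0 (end_ - start) 1).map (fun o =>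
      PySem.Int.band ((PySem.List.pyGet? bitmap_bytes (PySem.Int.floordiv o 8)).getD 0 >>> (PySem.Int.mod o 8).toNat) 1))) [] 0
    rw [zero_add, hb] at hA
    rw [add_zero] at hA hB
    rw [show start + (end_ - start) = end_ from by ring] at hA
    simp only [List.nil_append] at hA hB
    have h01 : ∀ x ∈ (PySem.List.pyRange 0 (end_ - start) 1).map (fun o =>
        PySem.Int.band ((PySem.List.pyGet? bitmap_bytes (PySem.Int.floordiv o 8)).getD 0 >>> (PySem.Int.mod o 8).toNat) 1),
        x = 0 ∨ x = 1 := by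
      intro x hx
      rcases List.mem_map.mp hx with ⟨o, _, rfl⟩
      exact pvposs _
    exact hA.trans ((pvMain _ h01 start).trans hB.symm)
  · have h0 : PySem.List.pyRange 0 (end_ - start) 1 = [] :=
      PySem.List.pyRange_one_eq_nil (by omega)
    simp [h0, pvGroupRuns]
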